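-- pv_equiv track=rewrite | github.com/dottenv/jslorm | jslorm/relations.py | validate_unique_constraints
-- ===== SOURCE A (Python) =====
-- from typing import Dict, Any, List, Optional, Type, Union, ForwardRef
--
-- def validate_unique_constraints(record: Dict[str, Any],
--                               existing_records: List[Dict[str, Any]],
--                               unique_fields: List[str]) -> List[str]:
--     errors = []
--     record_id = record.get("id")
--
--     for field in unique_fields:
--         value = record.get(field)
--         if value is not None:
--             for existing in existing_records:
--                 if (existing.get("id") != record_id and
--                     existing.get(field) == value):
--                     errors.append(f"Field {field} must be unique")
--                     break
--     return errors
-- ===== SOURCE B (Python) =====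
-- def validate_unique_constraints(record, existing_records, unique_fields):
--     record_id = record.get("id")
--     others = [e for e in existing_records if e.get("id") != record_id]
--     seen = set()
--     for e in others:
--         for field in unique_fields:
--             seen.add((field, e.get(field)))
--     return [f"Field {field} must be unique"
--             for field in unique_fields
--             if record.get(field) is not None and (field, record.get(field)) in seen]
-- ===== Notes on version B (the rewrite author's own statement) =====
-- stated objective: alternative
-- what changed: Replaces A's per-field rescan of existing_records (with break) by a single index-building pass that collects (field, value) pairs of all other-id records into a set, followed by one membership-test pass over unique_fields.
import Mathlib
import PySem

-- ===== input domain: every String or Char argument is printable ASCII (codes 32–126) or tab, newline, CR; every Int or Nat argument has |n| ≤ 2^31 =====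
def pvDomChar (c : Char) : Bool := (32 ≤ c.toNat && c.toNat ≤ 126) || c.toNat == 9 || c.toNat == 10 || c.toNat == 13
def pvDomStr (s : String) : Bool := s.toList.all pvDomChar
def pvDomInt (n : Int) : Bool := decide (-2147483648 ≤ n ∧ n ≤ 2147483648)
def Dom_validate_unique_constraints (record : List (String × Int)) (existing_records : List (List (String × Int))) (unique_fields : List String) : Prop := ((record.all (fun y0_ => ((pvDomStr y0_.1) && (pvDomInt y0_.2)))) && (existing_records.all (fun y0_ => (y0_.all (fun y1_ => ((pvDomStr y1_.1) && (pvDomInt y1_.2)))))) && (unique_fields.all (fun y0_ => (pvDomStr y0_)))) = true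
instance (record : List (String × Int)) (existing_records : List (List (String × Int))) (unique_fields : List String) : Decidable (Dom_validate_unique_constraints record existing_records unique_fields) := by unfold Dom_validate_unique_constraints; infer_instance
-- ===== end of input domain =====

-- B builds a (field, value) index of other-id records in one pass, then answers each unique field by a set lookup; same result, different traversal.

-- dict.get(k) on an association list (first match)
def pvGet (d : List (String × Int)) (k : String) : Option Int := (PySem.Dict.mk d).get? k

-- ===== PORT A =====
-- inner 'for existing in existing_records: … break' loop of A
def vucScan (record_id : Option Int) (field : String) (v : Int) : List (List (String × Int)) → Bool
  | [] => false
  | e :: rest =>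
      if pvGet e "id" ≠ record_id ∧ pvGet e field = some v then true
      else vucScan record_id field v rest

def validate_unique_constraints (record : List (String × Int)) (existing_records : List (List (String × Int))) (unique_fields : List String) : List String :=
  let record_id := pvGet record "id"
  unique_fields.foldl (fun errors field =>
    match pvGet record field with
    | none => errors
    | some v =>
        if vucScan record_id field v existing_records then
          errors ++ ["Field " ++ field ++ " must be unique"]
        else errors) []

-- ===== PORT B =====
def validate_unique_constraints_alt (record : List (String × Int)) (existing_records : List (List (String × Int))) (unique_fields : List String) : List String :=
  let record_id := pvGet record "id"
  let others := existing_records.filter (fun e => pvGet e "id" != record_id)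
  let seen : PySem.Set (String × Option Int) :=
    others.foldl (fun s e => unique_fields.foldl (fun s f => PySem.Set.add s (f, pvGet e f)) s) PySem.Set.empty
  (unique_fields.filter (fun f => (pvGet record f).isSome && PySem.Set.contains seen (f, pvGet record f))).map
    (fun f => "Field " ++ f ++ " must be unique")

-- ===== PRECONDITION & SPEC =====
def Spec_validate_unique_constraints (record : List (String × Int)) (existing_records : List (List (String × Int))) (unique_fields : List String) (out : List String) : Prop := out = validate_unique_constraints_alt record existing_records unique_fields
instance (record : List (String × Int)) (existing_records : List (List (String × Int))) (unique_fields : List String) (out : List String) : Decidable (Spec_validate_unique_constraints record existing_records unique_fields out) := by unfold Spec_validate_unique_constraints; infer_instance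

-- ===== CLAIM (what is proved, stated in full; the proofs are below) =====
def Claim_equal_validate_unique_constraints : Prop := ∀ (record : List (String × Int)) (existing_records : List (List (String × Int))) (unique_fields : List String), Dom_validate_unique_constraints record existing_records unique_fields → Spec_validate_unique_constraints record existing_records unique_fields (validate_unique_constraints record existing_records unique_fields)

-- ===== LEMMAS AND PROOFS =====

-- A's break-loop is an existential over existing_records
theorem vucScan_iff (rid : Option Int) (f : String) (v : Int) (es : List (List (String × Int))) :
    vucScan rid f v es = true ↔ ∃ e ∈ es, pvGet e "id" ≠ rid ∧ pvGet e f = some v := by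
  induction es with
  | nil => simp [vucScan]
  | cons e rest ih =>
      simp only [vucScan]
      split_ifs with h
      · simp [h]
      · simp [ih, h]

-- membership in the inner (per-record) index pass
theorem mem_inner_fold (ufs : List String) (g : String → Option Int) (s : PySem.Set (String × Option Int))
    (x : String × Option Int) :
    x ∈ ufs.foldl (fun s f => PySem.Set.add s (f, g f)) s ↔ x ∈ s ∨ ∃ f ∈ ufs, x = (f, g f) := by
  induction ufs generalizing s with
  | nil => simp
  | cons f rest ih =>
      simp only [List.foldl_cons, ih, PySem.Set.mem_add, List.mem_cons]
      constructor
      · rintro (⟨h | h⟩ | ⟨f', hf', h⟩)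
        · exact Or.inl h
        · exact Or.inr ⟨f, Or.inl rfl, h⟩
        · exact Or.inr ⟨f', Or.inr hf', h⟩
      · rintro (h | ⟨f', hf' | hf', h⟩)
        · exact Or.inl (Or.inl h)
        · exact Or.inl (Or.inr (hf' ▸ h))
        · exact Or.inr ⟨f', hf', h⟩

-- membership in the full index built over all other-id records
theorem mem_seen (others : List (List (String × Int))) (ufs : List String)
    (s : PySem.Set (String × Option Int)) (x : String × Option Int) :
    x ∈ others.foldl (fun s e => ufs.foldl (fun s f => PySem.Set.add s (f, pvGet e f)) s) s ↔
      x ∈ s ∨ ∃ e ∈ others, ∃ f ∈ ufs, x = (f, pvGet e f) := by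
  induction others generalizing s with
  | nil => simp
  | cons e rest ih =>
      simp only [List.foldl_cons, ih, mem_inner_fold, List.mem_cons]
      constructor
      · rintro (⟨h | ⟨f, hf, h⟩⟩ | ⟨e', he', hx⟩)
        · exact Or.inl h
        · exact Or.inr ⟨e, Or.inl rfl, f, hf, h⟩
        · exact Or.inr ⟨e', Or.inr he', hx⟩
      · rintro (h | ⟨e', he' | he', hx⟩)
        · exact Or.inl (Or.inl h)
        · exact Or.inl (Or.inr (he' ▸ hx))
        · exact Or.inr ⟨e', he', hx⟩

-- ===== VERDICT (by name: the statement is the Claim_ definition above) =====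
theorem validate_unique_constraints_spec : Claim_equal_validate_unique_constraints := by
  intro record existing_records unique_fields _
  unfold Spec_validate_unique_constraints validate_unique_constraints validate_unique_constraints_alt
  simp only []
  set rid := pvGet record "id" with hrid
  -- A's fold body as an if-shape
  have hbody : ∀ (errors : List String) (f : String), f ∈ unique_fields →
      (match pvGet record f with
       | none => errors
       | some v => if vucScan rid f v existing_records then errors ++ ["Field " ++ f ++ " must be unique"] else errors)
      = if ((pvGet record f).isSome &&
            PySem.Set.contains
              ((existing_records.filter (fun e => pvGet e "id" != rid)).foldl
                (fun s e => unique_fields.foldl (fun s f => PySem.Set.add s (f, pvGet e f)) s) PySem.Set.empty)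
              (f, pvGet record f)) = true
        then errors ++ ["Field " ++ f ++ " must be unique"] else errors := by
    intro errors f hf
    cases hv : pvGet record f with
    | none => simp
    | some v =>
        simp only [Option.isSome_some, Bool.true_and]
        have hc : PySem.Set.contains
            ((existing_records.filter (fun e => pvGet e "id" != rid)).foldl
              (fun s e => unique_fields.foldl (fun s f => PySem.Set.add s (f, pvGet e f)) s) PySem.Set.empty)
            (f, some v) = vucScan rid f v existing_records := by
          rw [Bool.eq_iff_iff, PySem.Set.contains_iff, mem_seen, vucScan_iff]
          constructor
          · rintro (h0 | ⟨e, he, f', hf', hx⟩)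
            · simp [PySem.Set.empty] at h0
            · rw [List.mem_filter] at he
              rcases Prod.mk.injEq .. ▸ hx with ⟨rfl, hval⟩
              exact ⟨e, he.1, by simpa using he.2, hval.symm⟩
          · rintro ⟨e, he, hid, hval⟩
            exact Or.inr ⟨e, List.mem_filter.2 ⟨he, by simpa using hid⟩, f, hf, by rw [hval]⟩
        rw [hc]
  -- rewrite A's fold pointwise on members, then fold-shape to filter+map
  refine Eq.trans (PySem.List.foldl_congr_mem _ _ _ _ hbody) ?_
  rw [PySem.List.foldl_append_ite (p := fun f =>
        ((pvGet record f).isSome &&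
            PySem.Set.contains
              ((existing_records.filter (fun e => pvGet e "id" != rid)).foldl
                (fun s e => unique_fields.foldl (fun s f => PySem.Set.add s (f, pvGet e f)) s) PySem.Set.empty)
              (f, pvGet record f)) = true)
      (f := fun f => "Field " ++ f ++ " must be unique")]
  simp
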